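-- pv_equiv track=rewrite | github.com/AytugUlubay/codeWarsPython | kyu7/Fizz & Buzz.py | solution
-- ===== SOURCE A (Python) =====
-- def solution(number):
--     a=0
--     b=0
--     c=0
--     for i in range(1,number):
--         if i%15==0:
--             c+=1
--         elif i%3==0 and i%5!=0:
--             a+=1
--         elif i%5==0 and i%3!=0:
--             b+=1
--     return([a,b,c])
-- ===== SOURCE B (Python) =====
-- def solution(number):
--     m = number - 1 if number > 1 else 0
--     t = m // 15
--     return [m // 3 - t, m // 5 - t, t]
-- ===== Notes on version B (the rewrite author's own statement) =====
-- stated objective: faster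
-- what changed: Replaced the linear loop that tests every i in range(1, number) with closed-form floor-division counts of multiples of three, five and fifteen.
import Mathlib
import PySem

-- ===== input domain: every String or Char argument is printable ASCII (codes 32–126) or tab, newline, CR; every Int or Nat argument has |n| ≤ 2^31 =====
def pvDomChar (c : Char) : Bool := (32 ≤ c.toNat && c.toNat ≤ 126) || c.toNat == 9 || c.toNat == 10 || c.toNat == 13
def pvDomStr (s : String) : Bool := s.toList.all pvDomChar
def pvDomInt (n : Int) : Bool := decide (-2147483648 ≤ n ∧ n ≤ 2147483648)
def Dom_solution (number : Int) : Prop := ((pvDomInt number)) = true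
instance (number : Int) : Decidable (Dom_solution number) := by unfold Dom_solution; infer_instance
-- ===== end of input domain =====

-- B replaces A's linear counting loop by closed-form floor-division counts of multiples (objective: faster).

-- ===== PORT A =====
-- the body of A's for-loop over i, acting on the state (a, b, c)
def solutionStep (s : Int × Int × Int) (i : Int) : Int × Int × Int :=
  if PySem.Int.mod i 15 = 0 then (s.1, s.2.1, s.2.2 + 1)
  else if PySem.Int.mod i 3 = 0 ∧ PySem.Int.mod i 5 ≠ 0 then (s.1 + 1, s.2.1, s.2.2)
  else if PySem.Int.mod i 5 = 0 ∧ PySem.Int.mod i 3 ≠ 0 then (s.1, s.2.1 + 1, s.2.2)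
  else s

def solution (number : Int) : List Int :=
  let r := (PySem.List.pyRange 1 number 1).foldl solutionStep (0, 0, 0)
  [r.1, r.2.1, r.2.2]

-- ===== PORT B =====
def solution_alt (number : Int) : List Int :=
  let m : Int := if number > 1 then number - 1 else 0
  let t := PySem.Int.floordiv m 15
  [PySem.Int.floordiv m 3 - t, PySem.Int.floordiv m 5 - t, t]

-- ===== PRECONDITION & SPEC =====
def Spec_solution (number : Int) (out : List Int) : Prop := out = solution_alt number
instance (number : Int) (out : List Int) : Decidable (Spec_solution number out) := by unfold Spec_solution; infer_instance

-- ===== CLAIM (what is proved, stated in full; the proofs are below) =====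
def Claim_equal_solution : Prop := ∀ (number : Int), Dom_solution number → Spec_solution number (solution number)

-- ===== LEMMAS AND PROOFS =====

lemma mod15_iff (k : Int) : (k + 1) % 15 = 0 ↔ (k + 1) % 3 = 0 ∧ (k + 1) % 5 = 0 := by omega
lemma div3_succ (k : Int) (h : (k + 1) % 3 = 0) : (k + 1) / 3 = k / 3 + 1 := by omega
lemma div3_succ' (k : Int) (h : (k + 1) % 3 ≠ 0) : (k + 1) / 3 = k / 3 := by omega
lemma div5_succ (k : Int) (h : (k + 1) % 5 = 0) : (k + 1) / 5 = k / 5 + 1 := by omega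
lemma div5_succ' (k : Int) (h : (k + 1) % 5 ≠ 0) : (k + 1) / 5 = k / 5 := by omega
lemma div15_succ (k : Int) (h : (k + 1) % 15 = 0) : (k + 1) / 15 = k / 15 + 1 := by omega
lemma div15_succ' (k : Int) (h : (k + 1) % 15 ≠ 0) : (k + 1) / 15 = k / 15 := by omega

lemma solutionStep_succ (k : Int) :
    solutionStep (k / 3 - k / 15, k / 5 - k / 15, k / 15) (k + 1) =
      ((k + 1) / 3 - (k + 1) / 15, (k + 1) / 5 - (k + 1) / 15, (k + 1) / 15) := by
  simp only [solutionStep,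
    PySem.Int.mod_eq_emod_of_pos (a := k + 1) (by omega : (0:Int) < 15),
    PySem.Int.mod_eq_emod_of_pos (a := k + 1) (by omega : (0:Int) < 3),
    PySem.Int.mod_eq_emod_of_pos (a := k + 1) (by omega : (0:Int) < 5)]
  split_ifs with h1 h2 h3
  · obtain ⟨h3, h5⟩ := (mod15_iff k).mp h1
    rw [div3_succ k h3, div5_succ k h5, div15_succ k h1]
    refine Prod.ext (by ring) (Prod.ext (by ring) rfl)
  · have h15 : (k + 1) % 15 ≠ 0 := fun hc => h2.2 ((mod15_iff k).mp hc).2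
    rw [div3_succ k h2.1, div5_succ' k h2.2, div15_succ' k h15]
    refine Prod.ext (by ring) (Prod.ext rfl rfl)
  · have h15 : (k + 1) % 15 ≠ 0 := fun hc => h3.2 ((mod15_iff k).mp hc).1
    rw [div3_succ' k h3.2, div5_succ k h3.1, div15_succ' k h15]
    refine Prod.ext rfl (Prod.ext (by ring) rfl)
  · by_cases hx3 : (k + 1) % 3 = 0
    · have hx5 : (k + 1) % 5 = 0 := by
        by_contra hx5; exact h2 ⟨hx3, hx5⟩
      exact absurd ((mod15_iff k).mpr ⟨hx3, hx5⟩) h1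
    · have hx5 : (k + 1) % 5 ≠ 0 := fun hc => hx3 (by
        by_contra _; exact h3 ⟨hc, hx3⟩)
      rw [div3_succ' k hx3, div5_succ' k hx5, div15_succ' k h1]

lemma solution_loop_eq (n : Nat) :
    (PySem.List.pyRange 1 ((n : Int) + 1) 1).foldl solutionStep (0, 0, 0) =
      ((n : Int) / 3 - (n : Int) / 15, (n : Int) / 5 - (n : Int) / 15, (n : Int) / 15) := by
  induction n with
  | zero =>
    rw [show ((0 : Nat) : Int) + 1 = 1 by norm_num,
        PySem.List.pyRange_one_eq_nil (by omega)]
    simp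
  | succ k ih =>
    have h : (((k + 1 : Nat) : Int) + 1) = ((k : Int) + 1) + 1 := by push_cast; ring
    rw [h, PySem.List.pyRange_one_succ_right (by omega), List.foldl_append, ih]
    simp only [List.foldl]
    exact solutionStep_succ (k : Int)

-- ===== VERDICT (by name: the statement is the Claim_ definition above) =====
theorem solution_spec : Claim_equal_solution := by
  intro number _
  unfold Spec_solution solution solution_alt
  by_cases h : number > 1
  · have hn : number = ((number - 1).toNat : Int) + 1 := by omega
    rw [hn, solution_loop_eq,
        if_pos (by omega : ((number - 1).toNat : Int) + 1 > 1),
        show ((number - 1).toNat : Int) + 1 - 1 = ((number - 1).toNat : Int) from by ring]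
    simp only [PySem.Int.floordiv_eq_ediv_of_pos (show (0:Int) < 3 by omega),
        PySem.Int.floordiv_eq_ediv_of_pos (show (0:Int) < 5 by omega),
        PySem.Int.floordiv_eq_ediv_of_pos (show (0:Int) < 15 by omega)]
  · rw [PySem.List.pyRange_one_eq_nil (by omega)]
    simp [if_neg h, PySem.Int.floordiv]
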